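-- pv_equiv track=rewrite | github.com/krasniukevych-marichka/UCUSnack-Inventory | tg_bot.py | format_by_product
-- ===== SOURCE A (Python) =====
-- def format_by_product(location_map):
--     if not location_map:
--         return "✅ Нічого не треба поповнювати!"
--     product_map = {}
--     for location, products in location_map.items():
--         for p_name, count in products.items():
--             product_map.setdefault(p_name, []).append((location, count))
--     lines = []
--     for product in sorted(product_map):
--         lines.append(f"🍫 *{product}*")
--         for loc, cnt in sorted(product_map[product]):
--             lines.append(f"  • {loc}: {cnt} шт.")
--         lines.append("")
--     return "\n".join(lines)
-- ===== SOURCE B (Python) =====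
-- def format_by_product(location_map):
--     if not location_map:
--         return "✅ Нічого не треба поповнювати!"
--     triples = sorted(
--         ((p, loc, cnt)
--          for loc, products in location_map.items()
--          for p, cnt in products.items()),
--         key=lambda t: (t[0], t[1]),
--     )
--     lines = []
--     current = None
--     for p, loc, cnt in triples:
--         if current != p:
--             if current is not None:
--                 lines.append("")
--             lines.append(f"🍫 *{p}*")
--             current = p
--         lines.append(f"  • {loc}: {cnt} шт.")
--     lines.append("")
--     return "\n".join(lines)
-- ===== Notes on version B (the rewrite author's own statement) =====
-- stated objective: alternative
-- what changed: Instead of grouping into a dict of per-product lists and sorting keys plus each group separately, B flattens the map into (product, location, count) triples, sorts once by (product, location), and emits the report in a single scan that starts a new block at each product boundary.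
import Mathlib
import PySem

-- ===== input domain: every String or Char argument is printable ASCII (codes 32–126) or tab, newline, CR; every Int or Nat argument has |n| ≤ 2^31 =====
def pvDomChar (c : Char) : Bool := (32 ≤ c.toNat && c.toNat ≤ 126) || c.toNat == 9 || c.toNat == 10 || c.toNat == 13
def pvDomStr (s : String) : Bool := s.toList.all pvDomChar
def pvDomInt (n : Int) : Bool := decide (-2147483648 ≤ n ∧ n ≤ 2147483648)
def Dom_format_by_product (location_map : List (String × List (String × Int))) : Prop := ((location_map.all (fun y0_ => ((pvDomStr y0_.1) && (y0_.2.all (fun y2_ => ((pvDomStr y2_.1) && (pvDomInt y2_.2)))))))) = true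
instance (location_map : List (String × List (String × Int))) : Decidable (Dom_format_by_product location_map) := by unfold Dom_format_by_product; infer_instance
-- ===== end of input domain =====

-- B replaces A's dict-of-lists grouping by one sort of flattened triples plus a single
-- boundary-detecting scan (objective: alternative decomposition, similar cost).

-- ===== PORT A =====
def pvMsg : String := "✅ Нічого не треба поповнювати!"
def pvHeader (p : String) : String := "🍫 *" ++ p ++ "*"
def pvItem (loc : String) (cnt : Int) : String := "  • " ++ loc ++ ": " ++ PySem.Int.toStr cnt ++ " шт."

def format_by_product (location_map : List (String × List (String × Int))) : String :=
  if location_map = [] then pvMsg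
  else
    let product_map : PySem.Dict String (List (String × Int)) :=
      location_map.foldl (fun d lp =>
        lp.2.foldl (fun d pc => d.modify pc.1 [] (· ++ [(lp.1, pc.2)])) d) PySem.Dict.empty
    let lines : List String :=
      (PySem.List.sorted product_map.keys (fun k => k)).foldl (fun ls product =>
        ((PySem.List.sorted2 (product_map.getD product []) (·.1) (·.2)).foldl
          (fun ls lc => ls ++ [pvItem lc.1 lc.2]) (ls ++ [pvHeader product])) ++ [""]) []
    PySem.Str.join "\n" lines

-- ===== PORT B =====
def format_by_product_alt (location_map : List (String × List (String × Int))) : String :=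
  if location_map = [] then pvMsg
  else
    let triples : List (String × String × Int) :=
      location_map.flatMap (fun lp => lp.2.map (fun pc => (pc.1, lp.1, pc.2)))
    let st := (PySem.List.sorted2 triples (·.1) (·.2.1)).foldl
      (fun (st : List String × Option String) t =>
        if st.2 ≠ some t.1 then
          (((if st.2 = none then st.1 else st.1 ++ [""]) ++ [pvHeader t.1]) ++ [pvItem t.2.1 t.2.2], some t.1)
        else (st.1 ++ [pvItem t.2.1 t.2.2], st.2)) ([], none)
    PySem.Str.join "\n" (st.1 ++ [""])

-- ===== PRECONDITION & SPEC =====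
-- The Python argument is a dict of dicts, so keys are unique at both levels; Pre_ excludes
-- association lists with duplicate keys, which do not represent any actual Python input.
def Pre_format_by_product (location_map : List (String × List (String × Int))) : Prop :=
  (location_map.map (·.1)).Nodup ∧ ∀ lp ∈ location_map, (lp.2.map (·.1)).Nodup
instance (location_map : List (String × List (String × Int))) : Decidable (Pre_format_by_product location_map) := by unfold Pre_format_by_product; infer_instance
def pvWitness_format_by_product : (List (String × List (String × Int))) :=
  [("shelf", [("bar", 2), ("cookie", 1)]), ("box", [("bar", 3)])]
def Spec_format_by_product (location_map : List (String × List (String × Int))) (out : String) : Prop := out = format_by_product_alt location_map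
instance (location_map : List (String × List (String × Int))) (out : String) : Decidable (Spec_format_by_product location_map out) := by unfold Spec_format_by_product; infer_instance

-- ===== CLAIM (what is proved, stated in full; the proofs are below) =====
def Claim_equal_format_by_product : Prop := ∀ (location_map : List (String × List (String × Int))), Dom_format_by_product location_map → Pre_format_by_product location_map → Spec_format_by_product location_map (format_by_product location_map)

-- ===== LEMMAS AND PROOFS =====

-- the flattened triple list B builds
def pvTriples (m : List (String × List (String × Int))) : List (String × String × Int) :=
  m.flatMap (fun lp => lp.2.map (fun pc => (pc.1, lp.1, pc.2)))

-- the lines of one product block (header + item lines)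
def pvEmitGroup (g : String × List (String × Int)) : List String :=
  pvHeader g.1 :: g.2.map (fun lc => pvItem lc.1 lc.2)

-- B's scan output over a list of blocks, with a pending-separator flag
def pvEmitFrom : Bool → List (String × List (String × Int)) → List String
  | _, [] => []
  | sep, g :: gs => (if sep then [""] else []) ++ pvEmitGroup g ++ pvEmitFrom true gs

-- B's fold step
def pvStepB (st : List String × Option String) (t : String × String × Int) : List String × Option String :=
  if st.2 ≠ some t.1 then
    (((if st.2 = none then st.1 else st.1 ++ [""]) ++ [pvHeader t.1]) ++ [pvItem t.2.1 t.2.2], some t.1)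
  else (st.1 ++ [pvItem t.2.1 t.2.2], st.2)

-- B's sort key on triples
def pvKey (t : String × String × Int) : Lex (String × String) := toLex (t.1, t.2.1)

theorem pv_sorted2_eq_sorted_lex {α κ₁ κ₂ : Type} [LinearOrder κ₁] [LinearOrder κ₂]
    (xs : List α) (k1 : α → κ₁) (k2 : α → κ₂) :
    PySem.List.sorted2 xs k1 k2 = PySem.List.sorted xs (fun x => toLex (k1 x, k2 x)) := by
  unfold PySem.List.sorted2 PySem.List.sorted
  simp only [if_neg (by decide : ¬ (false = true))]
  congr 1
  funext acc x
  congr 1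
  funext a b
  rcases lt_trichotomy (k1 a) (k1 b) with h | h | h
  · simp [h, Prod.Lex.lt_iff, not_lt.mpr h.le]
  · simp [h, Prod.Lex.lt_iff]
  · simp [h, Prod.Lex.lt_iff, not_lt.mpr h.le, ne_of_gt h]

theorem pv_perm_flatMap_filter {α : Type} (l : List α) (key : α → String) (ks : List String)
    (hnd : ks.Nodup) (hmem : ∀ x ∈ l, key x ∈ ks) :
    (ks.flatMap (fun p => l.filter (fun x => key x == p))).Perm l := by
  induction ks generalizing l with
  | nil =>
    cases l with
    | nil => simp
    | cons x t => exact absurd (hmem x (by simp)) (by simp)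
  | cons k ks ih =>
    rw [List.flatMap_cons]
    have hrw : ks.flatMap (fun p => l.filter (fun x => key x == p))
        = ks.flatMap (fun p => (l.filter (fun x => !(key x == k))).filter (fun x => key x == p)) := by
      apply List.flatMap_congr
      intro p hp
      rw [List.filter_filter]
      apply List.filter_congr
      intro x _
      rcases hk : key x == k with _ | _
      · simp
      · have hxk : key x = k := by simpa using hk
        have hnp : ¬ (key x == p) = true := by
          simp [hxk]
          rintro rfl
          exact (List.nodup_cons.mp hnd).1 hp
        simp [hnp]
    rw [hrw]
    have hperm' := ih (l.filter (fun x => !(key x == k))) (List.nodup_cons.mp hnd).2 (by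
      intro x hx
      rcases List.mem_filter.mp hx with ⟨hxl, hkk⟩
      have := hmem x hxl
      simp at hkk
      simpa [hkk] using this)
    exact (List.Perm.append_left _ hperm').trans (List.filter_append_perm (fun x => key x == k) l)

theorem pv_foldB_within (pairs : List (String × Int)) (p : String) (ls : List String) :
    (pairs.map (fun lc => (p, lc))).foldl pvStepB (ls, some p)
      = (ls ++ pairs.map (fun lc => pvItem lc.1 lc.2), some p) := by
  induction pairs generalizing ls with
  | nil => simp
  | cons lc rest ih => simp [pvStepB, ih, List.append_assoc]

theorem pv_foldB_group (pairs : List (String × Int)) (p : String) (ls : List String)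
    (cur : Option String) (hne : pairs ≠ []) (hcur : cur ≠ some p) :
    (pairs.map (fun lc => (p, lc))).foldl pvStepB (ls, cur)
      = (ls ++ (if cur.isSome then [""] else []) ++ pvEmitGroup (p, pairs), some p) := by
  cases pairs with
  | nil => exact absurd rfl hne
  | cons lc rest =>
    simp only [List.map_cons, List.foldl_cons]
    rw [show pvStepB (ls, cur) (p, lc)
        = ((if cur = none then ls else ls ++ [""]) ++ [pvHeader p] ++ [pvItem lc.1 lc.2], some p) by
      simp [pvStepB, hcur]]
    rw [pv_foldB_within]
    cases cur with
    | none => simp [pvEmitGroup, List.append_assoc]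
    | some c => simp [pvEmitGroup, List.append_assoc]

theorem pv_foldB_groups (gs : List (String × List (String × Int))) (ls : List String) (cur : Option String)
    (h1 : ∀ g ∈ gs, g.2 ≠ []) (h2 : ∀ g ∈ gs, cur ≠ some g.1) (h3 : (gs.map (·.1)).Nodup) :
    ((gs.flatMap (fun g => g.2.map (fun lc => (g.1, lc)))).foldl pvStepB (ls, cur)).1
      = ls ++ pvEmitFrom cur.isSome gs := by
  induction gs generalizing ls cur with
  | nil => simp [pvEmitFrom]
  | cons g gs ih =>
    rw [List.flatMap_cons, List.foldl_append]
    rw [pv_foldB_group g.2 g.1 ls cur (h1 g (by simp)) (h2 g (by simp))]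
    rw [ih _ (some g.1) (fun g' hg' => h1 g' (by simp [hg'])) ?_ (by simpa using h3.of_cons)]
    · show ls ++ (if cur.isSome then [""] else []) ++ pvEmitGroup (g.1, g.2) ++ pvEmitFrom true gs
        = ls ++ pvEmitFrom cur.isSome (g :: gs)
      simp [pvEmitFrom, List.append_assoc]
    · intro g' hg' hc
      have hm : g.1 ∈ gs.map (·.1) :=
        List.mem_map.mpr ⟨g', hg', by simpa using hc.symm⟩
      exact (List.nodup_cons.mp (by simpa using h3)).1 hm

theorem pv_emitFrom_true_append (gs : List (String × List (String × Int))) :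
    pvEmitFrom true gs ++ [""] = "" :: gs.flatMap (fun g => pvEmitGroup g ++ [""]) := by
  induction gs with
  | nil => simp [pvEmitFrom]
  | cons g gs ih =>
    simp only [pvEmitFrom, List.flatMap_cons, List.append_assoc, List.cons_append, ih]
    simp

theorem pv_emitFrom_false_append (gs : List (String × List (String × Int))) (h : gs ≠ []) :
    pvEmitFrom false gs ++ [""] = gs.flatMap (fun g => pvEmitGroup g ++ [""]) := by
  cases gs with
  | nil => exact absurd rfl h
  | cons g gs => simp [pvEmitFrom, List.append_assoc, pv_emitFrom_true_append]

theorem pv_mem_triples_loc (m : List (String × List (String × Int))) (t : String × String × Int)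
    (h : t ∈ pvTriples m) : t.2.1 ∈ m.map (·.1) := by
  rcases List.mem_flatMap.mp h with ⟨lp, hlp, ht⟩
  rcases List.mem_map.mp ht with ⟨pc, _, rfl⟩
  exact List.mem_map.mpr ⟨lp, hlp, rfl⟩

theorem pv_nodup_locs (m : List (String × List (String × Int)))
    (hnd1 : (m.map (·.1)).Nodup) (hnd2 : ∀ lp ∈ m, (lp.2.map (·.1)).Nodup) (p : String) :
    ((((pvTriples m).filter (fun t => t.1 == p)).map (·.2)).map (·.1)).Nodup := by
  induction m with
  | nil => simp [pvTriples]
  | cons lp m ih =>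
    have hstep : pvTriples (lp :: m) = lp.2.map (fun pc => (pc.1, lp.1, pc.2)) ++ pvTriples m := by
      simp [pvTriples]
    rw [hstep, List.filter_append, List.map_append, List.map_append]
    apply List.Nodup.append
    · -- first block: at most one element after the filter
      have hlen : ((lp.2.map (fun pc => (pc.1, lp.1, pc.2))).filter (fun t => t.1 == p)).length ≤ 1 := by
        rw [List.filter_map, List.length_map, ← List.countP_eq_length_filter]
        have hcnt := (List.nodup_iff_count_le_one.mp (hnd2 lp (by simp))) p
        rw [List.count, List.countP_map] at hcnt
        simpa [Function.comp] using hcnt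
      rcases hf : (lp.2.map (fun pc => (pc.1, lp.1, pc.2))).filter (fun t => t.1 == p) with _ | ⟨a, rest⟩
      · simp [hf]
      · rw [hf] at hlen
        have hrest : rest = [] := by
          cases rest with
          | nil => rfl
          | cons b r => simp at hlen
        subst hrest
        simp [hf]
    · exact ih (by simpa using hnd1.of_cons) (fun lp' h' => hnd2 lp' (by simp [h']))
    · -- disjoint: first block's locations are lp.1, second block's are in m.map (·.1)
      intro x hx1 hx2
      rcases List.mem_map.mp hx2 with ⟨y, hy, rfl⟩
      rcases List.mem_map.mp hy with ⟨t, ht, rfl⟩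
      have hloc := pv_mem_triples_loc m t (List.mem_of_mem_filter ht)
      have hx1' : t.2.1 = lp.1 := by
        rcases List.mem_map.mp hx1 with ⟨y2, hy2, he⟩
        rcases List.mem_map.mp hy2 with ⟨t2, ht2, rfl⟩
        rcases List.mem_map.mp (List.mem_of_mem_filter ht2) with ⟨pc, _, rfl⟩
        simpa using he.symm
      rw [hx1'] at hloc
      exact (List.nodup_cons.mp (by simpa using hnd1)).1 hloc

theorem pv_pairwise_group (pairs : List (String × Int)) (hnd : (pairs.map (·.1)).Nodup) (p : String) :
    ((PySem.List.sorted2 pairs (·.1) (·.2)).map (fun lc => (p, lc))).Pairwise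
      (fun a b => pvKey a < pvKey b) := by
  rw [List.pairwise_map]
  have h1 : (PySem.List.sorted2 pairs (·.1) (·.2)).Pairwise
      (fun a b => toLex (a.1, a.2) ≤ toLex (b.1, b.2)) := by
    rw [pv_sorted2_eq_sorted_lex]
    exact PySem.List.sorted_pairwise pairs (fun x => toLex (x.1, x.2))
  have hnd' : ((PySem.List.sorted2 pairs (·.1) (·.2)).map (·.1)).Nodup :=
    (((PySem.List.sorted2_perm pairs (·.1) (·.2) false).map (·.1)).nodup_iff).mpr hnd
  have h2 : (PySem.List.sorted2 pairs (·.1) (·.2)).Pairwise (fun a b => a.1 ≠ b.1) :=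
    List.pairwise_map.mp hnd'
  refine (h1.and h2).imp ?_
  rintro a b ⟨hle, hne⟩
  have : a.1 < b.1 := by
    rcases Prod.Lex.le_iff.mp hle with h | ⟨h, _⟩
    · exact h
    · exact absurd h hne
  simp [pvKey, Prod.Lex.lt_iff, this]

-- ===== VERDICT (by name: the statement is the Claim_ definition above) =====
theorem format_by_product_spec : Claim_equal_format_by_product := by
  intro m hdom hpre
  unfold Spec_format_by_product format_by_product format_by_product_alt
  by_cases hm : m = []
  · simp [hm]
  · rw [if_neg hm, if_neg hm]
    obtain ⟨hnd1, hnd2⟩ := hpre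
    simp only []
    -- A's nested dict-building loop is the fold of the flattened triple list
    have hpm : m.foldl (fun d lp => lp.2.foldl (fun d pc => d.modify pc.1 [] (fun x => x ++ [(lp.1, pc.2)])) d) PySem.Dict.empty
        = (pvTriples m).foldl (fun d t => d.modify t.1 [] (fun x => x ++ [t.2])) PySem.Dict.empty := by
      rw [pvTriples, List.foldl_flatMap]
      simp [List.foldl_map]
    rw [hpm]
    set pm := (pvTriples m).foldl (fun d t => d.modify t.1 [] (fun x => x ++ [t.2])) PySem.Dict.empty with hpmdef
    have hgetD : ∀ p, pm.getD p [] = ((pvTriples m).filter (fun t => t.1 == p)).map (·.2) := by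
      intro p
      rw [hpmdef]
      simpa using PySem.Dict.getD_foldl_modify_append (pvTriples m) PySem.Dict.empty p
    have hkeys : pm.keys = PySem.Set.ofList ((pvTriples m).map (·.1)) := by
      rw [hpmdef]
      simpa using PySem.Dict.keys_foldl_modify_key (pvTriples m) (·.1) []
        (fun _ t => fun x => x ++ [t.2]) PySem.Dict.empty
    set ks := PySem.List.sorted pm.keys (fun k => k) with hksdef
    have hks_nodup : ks.Nodup :=
      ((PySem.List.sorted_perm pm.keys (fun k => k) false).nodup_iff).mpr
        (by rw [hkeys]; exact PySem.Set.nodup_ofList _)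
    have hks_mem : ∀ p, p ∈ ks ↔ p ∈ (pvTriples m).map (·.1) := by
      intro p
      rw [hksdef, PySem.List.mem_sorted, hkeys, PySem.Set.mem_ofList]
    have hks_lt : ks.Pairwise (· < ·) := by
      have h1 : ks.Pairwise (· ≤ ·) := PySem.List.sorted_pairwise pm.keys (fun k => k)
      exact (h1.and hks_nodup).imp (fun ⟨a, b⟩ => lt_of_le_of_ne a b)
    set G := ks.map (fun p => (p, PySem.List.sorted2 (pm.getD p []) (·.1) (·.2))) with hGdef
    have hGfst : G.map (·.1) = ks := by rw [hGdef, List.map_map]; exact List.map_id ks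
    have hGne : ∀ g ∈ G, g.2 ≠ [] := by
      intro g hg
      rcases List.mem_map.mp hg with ⟨p, hp, rfl⟩
      rw [pv_sorted2_eq_sorted_lex, Ne, PySem.List.sorted_eq_nil_iff, hgetD p]
      rcases List.mem_map.mp ((hks_mem p).mp hp) with ⟨t, ht, rfl⟩
      intro hnil
      rw [List.map_eq_nil_iff, List.filter_eq_nil_iff] at hnil
      exact hnil t ht (by simp)
    -- the single sort of the triples equals the concatenation of A's groups
    have hsorted : PySem.List.sorted2 (pvTriples m) (·.1) (·.2.1)
        = G.flatMap (fun g => g.2.map (fun lc => (g.1, lc))) := by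
      rw [pv_sorted2_eq_sorted_lex]
      apply PySem.List.sorted_eq_of_perm_of_pairwise_lt
      · -- permutation
        have hflat : (G.flatMap (fun g => g.2.map (fun lc => (g.1, lc)))).Perm
            (ks.flatMap (fun p => (pvTriples m).filter (fun t => t.1 == p))) := by
          rw [hGdef, List.flatMap_map]
          apply List.Perm.flatMap_left
          intro p hp
          have h2 : (pm.getD p []).map (fun lc => (p, lc)) = (pvTriples m).filter (fun t => t.1 == p) := by
            rw [hgetD p, List.map_map]
            have hc : ∀ t ∈ (pvTriples m).filter (fun t => t.1 == p),
                ((fun lc => (p, lc)) ∘ (fun x => x.2)) t = id t := by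
              intro t ht
              have h1p : t.1 = p := by simpa using (List.mem_filter.mp ht).2
              cases t with
              | mk a bc => simp at h1p ⊢; exact h1p.symm
            rw [List.map_congr_left hc, List.map_id]
          calc ((PySem.List.sorted2 (pm.getD p []) (fun x => x.1) (fun x => x.2)).map (fun lc => (p, lc))).Perm
                ((pm.getD p []).map (fun lc => (p, lc))) :=
              (PySem.List.sorted2_perm (pm.getD p []) _ _ false).map _
            _ = (pvTriples m).filter (fun t => t.1 == p) := h2
        exact hflat.trans (pv_perm_flatMap_filter (pvTriples m) (·.1) ks hks_nodup
          (fun t ht => (hks_mem t.1).mpr (List.mem_map.mpr ⟨t, ht, rfl⟩)))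
      · -- strictly increasing under the lexicographic key
        rw [List.flatMap_def, List.pairwise_flatten]
        constructor
        · intro l hl
          rcases List.mem_map.mp hl with ⟨g, hg, rfl⟩
          rcases List.mem_map.mp hg with ⟨p, hp, rfl⟩
          have hndloc : ((pm.getD p []).map (·.1)).Nodup := by
            rw [hgetD p]
            exact pv_nodup_locs m hnd1 hnd2 p
          exact pv_pairwise_group (pm.getD p []) hndloc p
        · rw [hGdef, List.map_map, List.pairwise_map]
          refine hks_lt.imp ?_
          intro p q hpq x hx y hy
          rcases List.mem_map.mp hx with ⟨lc, _, rfl⟩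
          rcases List.mem_map.mp hy with ⟨lc', _, rfl⟩
          simp only []
          exact Prod.Lex.lt_iff.mpr (Or.inl hpq)
    -- A's line-building loop produces the concatenated blocks
    have hlines : (PySem.List.sorted pm.keys (fun k => k)).foldl
        (fun ls product =>
          (PySem.List.sorted2 (pm.getD product []) (fun x => x.1) (fun x => x.2)).foldl
            (fun ls lc => ls ++ [pvItem lc.1 lc.2]) (ls ++ [pvHeader product]) ++ [""]) []
        = G.flatMap (fun g => pvEmitGroup g ++ [""]) := by
      rw [← hksdef]
      have hstep : (fun (ls : List String) product =>
          (PySem.List.sorted2 (pm.getD product []) (fun x => x.1) (fun x => x.2)).foldl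
            (fun ls lc => ls ++ [pvItem lc.1 lc.2]) (ls ++ [pvHeader product]) ++ [""])
          = (fun ls product => ls ++
              (pvEmitGroup (product, PySem.List.sorted2 (pm.getD product []) (fun x => x.1) (fun x => x.2)) ++ [""])) := by
        funext ls product
        rw [PySem.List.foldl_append_singleton_eq_map]
        simp [pvEmitGroup, List.append_assoc]
      rw [hstep, PySem.List.foldl_append_eq_flatMap, hGdef, List.flatMap_map]
      simp
    -- B's scan over the sorted triples
    have hB : ((PySem.List.sorted2 (pvTriples m) (fun x => x.1) (fun x => x.2.1)).foldl pvStepB ([], none)).1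
        = pvEmitFrom false G := by
      rw [hsorted]
      exact pv_foldB_groups G [] none hGne (by simp) (hGfst ▸ hks_nodup)
    rw [show (fun (st : List String × Option String) (t : String × String × Int) =>
        if st.2 ≠ some t.1 then
          ((if st.2 = none then st.1 else st.1 ++ [""]) ++ [pvHeader t.1] ++ [pvItem t.2.1 t.2.2], some t.1)
        else (st.1 ++ [pvItem t.2.1 t.2.2], st.2)) = pvStepB from rfl]
    rw [show m.flatMap (fun lp => lp.2.map (fun pc => (pc.1, lp.1, pc.2))) = pvTriples m from rfl]
    rw [hlines, hB]
    rcases hG : G with _ | ⟨g, gs⟩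
    · simp [pvEmitFrom]
      decide
    · rw [pv_emitFrom_false_append _ (by simp)]
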